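-- pv_equiv track=rewrite | github.com/JEBANERD/FruitSmash_Repo | tools/task2_auto_fix.py | _close_tables_before_type
-- ===== SOURCE A (Python) =====
-- from typing import Dict, List, Optional, Sequence, Tuple
--
-- def _close_tables_before_type(source: str) -> str:
--     result: List[str] = []
--     index = 0
--     length = len(source)
--     while index < length:
--         brace_index = source.find("{", index)
--         if brace_index == -1:
--             result.append(source[index:])
--             break
--         result.append(source[index:brace_index])
--         lookahead = brace_index + 1
--         whitespace = []
--         while lookahead < length and source[lookahead] in " \t\r\n":
--             whitespace.append(source[lookahead])
--             lookahead += 1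
--         if source.startswith("type", lookahead):
--             result.append("{}")
--             if whitespace:
--                 result.append("".join(whitespace))
--             index = lookahead
--         else:
--             result.append("{")
--             if whitespace:
--                 result.append("".join(whitespace))
--             index = lookahead
--     return "".join(result)
-- ===== SOURCE B (Python) =====
-- def _close_tables_before_type(source: str) -> str:
--     out = []
--     n = len(source)
--     for i, ch in enumerate(source):
--         out.append(ch)
--         if ch == '{':
--             j = i + 1
--             while j < n and source[j] in " \t\r\n":
--                 j += 1
--             if source.startswith("type", j):
--                 out.append('}')
--     return "".join(out)
-- ===== Notes on version B (the rewrite author's own statement) =====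
-- stated objective: simpler
-- what changed: A's find-next-brace segment loop with a collected whitespace buffer and pieces appended to a result list is replaced by a single per-character pass that emits every character and one extra '}' right after a '{' whose whitespace-skipped suffix starts with 'type'.
import Mathlib
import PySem

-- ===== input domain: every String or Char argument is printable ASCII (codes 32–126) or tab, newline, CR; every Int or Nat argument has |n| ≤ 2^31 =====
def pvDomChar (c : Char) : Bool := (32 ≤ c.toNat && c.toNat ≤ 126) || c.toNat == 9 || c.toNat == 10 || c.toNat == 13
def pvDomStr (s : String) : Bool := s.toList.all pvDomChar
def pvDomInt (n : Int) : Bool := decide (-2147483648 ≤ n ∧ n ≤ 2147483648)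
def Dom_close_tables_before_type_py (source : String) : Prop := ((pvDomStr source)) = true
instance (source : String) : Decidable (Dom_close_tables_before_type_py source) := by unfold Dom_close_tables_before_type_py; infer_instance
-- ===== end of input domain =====

-- B replaces A's find-next-brace segment loop (which copies segments and a collected
-- whitespace buffer) by a single per-character pass that emits an extra '}' after a
-- qualifying '{'; objective: simpler. Both are total; equivalence proved on all of Dom.

def pvWs (c : Char) : Bool := c = ' ' || c = '\t' || c = '\r' || c = '\n'

def pvStartsType : List Char → Bool
  | 't' :: 'y' :: 'p' :: 'e' :: _ => true
  | _ => false

-- ===== PORT A =====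
-- A's outer while loop, one call per iteration on the remaining suffix source[index:]:
-- source.find("{", index) = split at the first '{' (takeWhile/dropWhile, .tail = after
-- the brace); the inner while collects the whitespace run (takeWhile/dropWhile pvWs);
-- startswith("type", lookahead) = pvStartsType; the appended pieces are as in A.
def closeA (s : List Char) : List Char :=
  if h : s.dropWhile (· ≠ '{') = [] then
    s                                          -- brace_index == -1: append source[index:]
  else
    if pvStartsType (((s.dropWhile (· ≠ '{')).tail).dropWhile pvWs) then
      s.takeWhile (· ≠ '{') ++ '{' :: '}' ::
        (((s.dropWhile (· ≠ '{')).tail).takeWhile pvWs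
          ++ closeA (((s.dropWhile (· ≠ '{')).tail).dropWhile pvWs))
    else
      s.takeWhile (· ≠ '{') ++ '{' ::
        (((s.dropWhile (· ≠ '{')).tail).takeWhile pvWs
          ++ closeA (((s.dropWhile (· ≠ '{')).tail).dropWhile pvWs))
termination_by s.length
decreasing_by
  all_goals
    have h1 : (((s.dropWhile (· ≠ '{')).tail).dropWhile pvWs).length ≤ (s.dropWhile (· ≠ '{')).tail.length :=
      List.length_dropWhile_le ..
    have h2 : (s.dropWhile (· ≠ '{')).length ≤ s.length := List.length_dropWhile_le ..
    have h3 : (s.dropWhile (· ≠ '{')).length ≠ 0 := by simpa using h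
    have h4 : (s.dropWhile (· ≠ '{')).tail.length = (s.dropWhile (· ≠ '{')).length - 1 :=
      List.length_tail ..
    omega

def close_tables_before_type_py (source : String) : String :=
  String.ofList (closeA source.toList)

-- ===== PORT B =====
-- Source B's single pass: every character is emitted; after a '{' whose whitespace-skipped
-- suffix starts with "type", an extra '}' is emitted.
def closeB : List Char → List Char
  | [] => []
  | c :: rest =>
    if c = '{' && pvStartsType (rest.dropWhile pvWs) then
      c :: '}' :: closeB rest
    else
      c :: closeB rest

def close_tables_before_type_py_alt (source : String) : String :=
  String.ofList (closeB source.toList)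

-- ===== PRECONDITION & SPEC =====
def Spec_close_tables_before_type_py (source : String) (out : String) : Prop := out = close_tables_before_type_py_alt source
instance (source : String) (out : String) : Decidable (Spec_close_tables_before_type_py source out) := by unfold Spec_close_tables_before_type_py; infer_instance

-- ===== CLAIM (what is proved, stated in full; the proofs are below) =====
def Claim_equal_close_tables_before_type_py : Prop := ∀ (source : String), Dom_close_tables_before_type_py source → Spec_close_tables_before_type_py source (close_tables_before_type_py source)

-- ===== LEMMAS AND PROOFS =====

theorem pvWs_ne_brace (c : Char) (h : pvWs c = true) : c ≠ '{' := by
  intro hc; subst hc; exact absurd h (by decide)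

-- B passes straight through a block containing no '{'.
theorem closeB_append_no_brace (pre t : List Char) (hpre : ∀ c ∈ pre, c ≠ '{') :
    closeB (pre ++ t) = pre ++ closeB t := by
  induction pre with
  | nil => rfl
  | cons c cs ih =>
    have hc : c ≠ '{' := hpre c (by simp)
    have : ∀ c ∈ cs, c ≠ '{' := fun x hx => hpre x (by simp [hx])
    simp [closeB, hc, ih this]

theorem closeA_eq_closeB (s : List Char) : closeA s = closeB s := by
  rw [closeA]
  by_cases h : s.dropWhile (· ≠ '{') = []
  · rw [dif_pos h]
    have hs : s.takeWhile (· ≠ '{') = s := by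
      conv_rhs => rw [← List.takeWhile_append_dropWhile (p := (· ≠ '{')) (l := s)]
      rw [h, List.append_nil]
    have hpre : ∀ c ∈ s, c ≠ '{' := by
      intro c hc
      rw [← hs] at hc
      simpa using List.mem_takeWhile_imp hc
    have := closeB_append_no_brace s [] hpre
    simpa [closeB] using this.symm
  · rw [dif_neg h]
    obtain ⟨b, tl, hd0⟩ := List.exists_cons_of_ne_nil h
    have hb : b = '{' := by
      have h2 := List.head_dropWhile_not (p := (· ≠ '{')) (l := s) h
      have h4 : (s.dropWhile (· ≠ '{')).head h = b :=
        Option.some.inj (by rw [← List.head?_eq_head h, hd0, List.head?_cons])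
      rw [h4] at h2
      simpa using h2
    have hd : s.dropWhile (· ≠ '{') = '{' :: (s.dropWhile (· ≠ '{')).tail := by
      rw [hd0]; simp [hb]
    have hsplit : s = s.takeWhile (· ≠ '{') ++ '{' :: (s.dropWhile (· ≠ '{')).tail := by
      conv_lhs => rw [← List.takeWhile_append_dropWhile (p := (· ≠ '{')) (l := s)]
      rw [← hd]
    have hpre : ∀ c ∈ s.takeWhile (· ≠ '{'), c ≠ '{' := by
      intro c hc; simpa using List.mem_takeWhile_imp hc
    have key : closeB s = s.takeWhile (· ≠ '{') ++ closeB ('{' :: (s.dropWhile (· ≠ '{')).tail) := by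
      conv_lhs => rw [hsplit]
      exact closeB_append_no_brace _ _ hpre
    have hrestB : closeB ((s.dropWhile (· ≠ '{')).tail)
        = ((s.dropWhile (· ≠ '{')).tail).takeWhile pvWs
          ++ closeB (((s.dropWhile (· ≠ '{')).tail).dropWhile pvWs) := by
      conv_lhs => rw [← List.takeWhile_append_dropWhile (p := pvWs) (l := (s.dropWhile (· ≠ '{')).tail)]
      exact closeB_append_no_brace _ _ (fun c hc => pvWs_ne_brace c (List.mem_takeWhile_imp hc))
    have ih := closeA_eq_closeB (((s.dropWhile (· ≠ '{')).tail).dropWhile pvWs)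
    by_cases ht : pvStartsType (((s.dropWhile (· ≠ '{')).tail).dropWhile pvWs) = true
    · rw [if_pos ht, key]
      simp only [closeB, decide_true, Bool.true_and, ht, if_true]
      rw [hrestB, ih]
    · rw [if_neg ht, key]
      simp only [closeB]
      rw [if_neg (by simpa using ht)]
      rw [hrestB, ih]
termination_by s.length
decreasing_by
  all_goals
    have h1 : (((s.dropWhile (· ≠ '{')).tail).dropWhile pvWs).length ≤ (s.dropWhile (· ≠ '{')).tail.length :=
      List.length_dropWhile_le ..
    have h2 : (s.dropWhile (· ≠ '{')).length ≤ s.length := List.length_dropWhile_le ..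
    have h3 : (s.dropWhile (· ≠ '{')).length ≠ 0 := by simpa using h
    have h4 : (s.dropWhile (· ≠ '{')).tail.length = (s.dropWhile (· ≠ '{')).length - 1 :=
      List.length_tail ..
    omega

-- ===== VERDICT (by name: the statement is the Claim_ definition above) =====
theorem close_tables_before_type_py_spec : Claim_equal_close_tables_before_type_py := by
  intro source _
  unfold Spec_close_tables_before_type_py close_tables_before_type_py close_tables_before_type_py_alt
  rw [closeA_eq_closeB]
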